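-- pv_equiv track=rewrite | github.com/anishLearnsToCode/playground-python | help/optimal_block.py | optimal_block
-- ===== SOURCE A (Python) =====
-- from typing import Dict, List, Tuple
--
-- def optimal_block(blocks: List[Dict[str, bool]], requirements: List[str]) -> int:
--     scores: List[Tuple[int, int]] = []
--     requirements = requirements[::-1]
--     for index, block in enumerate(blocks):
--         score = 0
--         for i, requirement in enumerate(requirements):
--             score += int(block[requirement]) * (2 ** i)
--         scores.append((index + 1, score))
--
--     scores.sort(key=lambda x: x[1], reverse=True)
--     return scores[0][0]
-- ===== SOURCE B (Python) =====
-- from typing import Dict, List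
--
--
-- def optimal_block(blocks: List[Dict[str, bool]], requirements: List[str]) -> int:
--     # Horner evaluation: requirements in original order, most significant first,
--     # is the same score as A's reversed-requirements power sum.
--     def score(block: Dict[str, bool]) -> int:
--         s = 0
--         for req in requirements:
--             s = 2 * s + (1 if block[req] else 0)
--         return s
--
--     best = max(enumerate(blocks, 1), key=lambda p: score(p[1]))
--     return best[0]
-- ===== Notes on version B (the rewrite author's own statement) =====
-- stated objective: simpler
-- what changed: Replaces building an (index, score) list and stable reverse-sorting it by a single max(..., key=score) pass (first maximal element = lowest index, matching the stable sort's tie-break), and computes each score by Horner evaluation over the requirements in original order instead of reversing them and summing explicit powers of two.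
import Mathlib
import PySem

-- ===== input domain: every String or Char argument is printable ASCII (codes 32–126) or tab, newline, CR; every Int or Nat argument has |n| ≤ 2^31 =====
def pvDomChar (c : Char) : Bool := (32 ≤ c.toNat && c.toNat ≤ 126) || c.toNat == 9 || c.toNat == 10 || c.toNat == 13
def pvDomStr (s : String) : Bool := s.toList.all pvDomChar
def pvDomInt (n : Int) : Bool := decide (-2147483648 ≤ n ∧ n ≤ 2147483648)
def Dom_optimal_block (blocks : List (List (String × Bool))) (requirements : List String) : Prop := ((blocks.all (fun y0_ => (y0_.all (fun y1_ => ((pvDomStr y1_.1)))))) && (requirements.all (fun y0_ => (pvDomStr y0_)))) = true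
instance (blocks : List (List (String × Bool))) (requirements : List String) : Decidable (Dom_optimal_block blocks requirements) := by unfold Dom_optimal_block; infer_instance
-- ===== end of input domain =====

-- B replaces A's build-all-scores-then-stable-reverse-sort by a single max-by-key pass with
-- Horner scoring; objective: simpler. Equivalence is proved for the RETURN value on Pre_.

-- ===== PORT A =====
-- score of one block: enumerate the (already reversed) requirements, add int(block[req]) * 2**i
def pyScoreA (block : List (String × Bool)) (reqs : List String) : Int :=
  (PySem.List.enumerate reqs 0).foldl
    (fun score p =>
      score + (if (PySem.Dict.mk block).getD p.2 false then (1 : Int) else 0) * 2 ^ p.1.toNat) 0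

def optimal_block (blocks : List (List (String × Bool))) (requirements : List String) : Int :=
  -- requirements = requirements[::-1]
  let reqs := (PySem.List.slice? requirements none none (-1)).getD []
  -- for index, block in enumerate(blocks): scores.append((index + 1, score))
  let scores : List (Int × Int) :=
    (PySem.List.enumerate blocks 0).foldl (fun acc p => acc ++ [(p.1 + 1, pyScoreA p.2 reqs)]) []
  -- scores.sort(key=lambda x: x[1], reverse=True); return scores[0][0]
  ((PySem.List.pyGet? (PySem.List.sorted scores (fun x => x.2) true) 0).getD (0, 0)).1

-- ===== PORT B =====
-- Horner: s = 2*s + (1 if block[req] else 0) over the requirements in original order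
def hornerScore (requirements : List String) (block : List (String × Bool)) : Int :=
  requirements.foldl
    (fun s r => 2 * s + (if (PySem.Dict.mk block).getD r false then (1 : Int) else 0)) 0

def optimal_block_alt (blocks : List (List (String × Bool))) (requirements : List String) : Int :=
  -- max(enumerate(blocks, 1), key=lambda p: score(p[1]))[0]
  ((PySem.List.max? (PySem.List.enumerate blocks 1)
      (fun p => hornerScore requirements p.2)).getD (0, [])).1

-- ===== PRECONDITION & SPEC =====
-- Pre_ excludes empty blocks (A raises IndexError on scores[0]) and any block missing a
-- required key (A raises KeyError on block[requirement]).
def Pre_optimal_block (blocks : List (List (String × Bool))) (requirements : List String) : Prop :=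
  blocks ≠ [] ∧ ∀ b ∈ blocks, ∀ r ∈ requirements, (PySem.Dict.mk b).contains r = true
instance (blocks : List (List (String × Bool))) (requirements : List String) : Decidable (Pre_optimal_block blocks requirements) := by unfold Pre_optimal_block; infer_instance

def pvWitness_optimal_block : (List (List (String × Bool))) × List String :=
  ([[("a", true)], [("a", false)]], ["a"])

def Spec_optimal_block (blocks : List (List (String × Bool))) (requirements : List String) (out : Int) : Prop := out = optimal_block_alt blocks requirements
instance (blocks : List (List (String × Bool))) (requirements : List String) (out : Int) : Decidable (Spec_optimal_block blocks requirements out) := by unfold Spec_optimal_block; infer_instance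

-- ===== CLAIM (what is proved, stated in full; the proofs are below) =====
def Claim_equal_optimal_block : Prop := ∀ (blocks : List (List (String × Bool))) (requirements : List String), Dom_optimal_block blocks requirements → Pre_optimal_block blocks requirements → Spec_optimal_block blocks requirements (optimal_block blocks requirements)

-- ===== LEMMAS AND PROOFS =====

-- enumerate over a snoc
theorem enumerate_append_singleton {α : Type} (ys : List α) (y : α) (s : Int) :
    PySem.List.enumerate (ys ++ [y]) s
      = PySem.List.enumerate ys s ++ [(s + ys.length, y)] := by
  induction ys generalizing s with
  | nil => simp [PySem.List.enumerate_nil, PySem.List.enumerate_cons]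
  | cons x xs ih =>
      simp [PySem.List.enumerate_cons, ih, add_assoc]
      ring_nf

-- Horner fold: peel the accumulator off
theorem horner_shift (g : String → Int) (rs : List String) (a : Int) :
    rs.foldl (fun s r => 2 * s + g r) a
      = a * 2 ^ rs.length + rs.foldl (fun s r => 2 * s + g r) 0 := by
  induction rs generalizing a with
  | nil => simp
  | cons r rs ih =>
      simp only [List.foldl_cons, List.length_cons]
      rw [ih (2 * a + g r), ih (2 * 0 + g r)]
      ring

-- A's reversed power-sum score equals B's Horner score
theorem score_eq (block : List (String × Bool)) (rs : List String) :
    pyScoreA block rs.reverse = hornerScore rs block := by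
  induction rs with
  | nil => simp [pyScoreA, hornerScore, PySem.List.enumerate_nil]
  | cons r rs ih =>
      have hrev : (r :: rs).reverse = rs.reverse ++ [r] := by simp
      unfold pyScoreA hornerScore
      rw [hrev, enumerate_append_singleton, List.foldl_append]
      simp only [List.foldl_cons, List.foldl_nil, List.length_reverse, zero_add]
      rw [horner_shift (fun r => (if (PySem.Dict.mk block).getD r false then (1 : Int) else 0)) rs
            (2 * 0 + (if (PySem.Dict.mk block).getD r false then (1 : Int) else 0))]
      unfold pyScoreA at ih
      unfold hornerScore at ih
      rw [ih]
      simp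
      ring

-- head of insertBy with the reverse comparison = running first-max step
theorem head?_insertBy {α : Type} (key : α → Int) (x : α) (ys : List α) :
    (PySem.List.insertBy (fun a b => decide (key b < key a)) x ys).head?
      = match ys.head? with
        | none => some x
        | some m => if key m < key x then some x else some m := by
  cases ys with
  | nil => simp [PySem.List.insertBy]
  | cons y ys =>
      simp only [PySem.List.insertBy, List.head?_cons]
      by_cases h : key y < key x
      · simp [h]
      · simp [h]

-- head of the insertion fold computes max? with an arbitrary starting accumulator
theorem head?_foldl_insertBy {α : Type} (key : α → Int) (xs : List α) (acc : List α) :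
    (xs.foldl (fun acc x => PySem.List.insertBy (fun a b => decide (key b < key a)) x acc) acc).head?
      = xs.foldl
          (fun o x =>
            match o with
            | none => some x
            | some m => if key m < key x then some x else some m)
          acc.head? := by
  induction xs generalizing acc with
  | nil => rfl
  | cons x xs ih =>
      simp only [List.foldl_cons]
      rw [ih, head?_insertBy]

-- head of the reverse-stable sort is the first maximal element
theorem head?_sorted_rev_eq_max? {α : Type} (xs : List α) (key : α → Int) :
    (PySem.List.sorted xs key true).head? = PySem.List.max? xs key := by
  rw [PySem.List.sorted_rev_eq_foldl_insertBy, PySem.List.max?]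
  exact head?_foldl_insertBy key xs []

-- max? of a mapped list
theorem max?_foldl_map {α β : Type} (f : α → β) (key : β → Int) (xs : List α) (o : Option α) :
    ((xs.map f).foldl
        (fun acc x =>
          match acc with
          | none => some x
          | some m => if key m < key x then some x else some m)
        (o.map f))
      = (xs.foldl
          (fun acc x =>
            match acc with
            | none => some x
            | some m => if key (f m) < key (f x) then some x else some m)
          o).map f := by
  induction xs generalizing o with
  | nil => rfl
  | cons x xs ih =>
      cases o with
      | none => simpa using ih (some x)
      | some m =>
          simp only [List.map_cons, List.foldl_cons, Option.map_some]
          by_cases h : key (f m) < key (f x)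
          · simpa [h] using ih (some x)
          · simpa [h] using ih (some m)

theorem max?_map {α β : Type} (f : α → β) (key : β → Int) (xs : List α) :
    PySem.List.max? (xs.map f) key = (PySem.List.max? xs (fun x => key (f x))).map f := by
  rw [PySem.List.max?, PySem.List.max?]
  simpa using max?_foldl_map f key xs none

-- scores[0] reads the head of the list
theorem pyGet?_zero {α : Type} (xs : List α) : PySem.List.pyGet? xs 0 = xs.head? := by
  cases xs <;> simp [PySem.List.pyGet?, PySem.List.pyIdx?]

-- shifting enumerate's start by one while adding one to each produced index
theorem enumerate_shift {α β : Type} (g : Int × α → β)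
    (xs : List α) (s : Int) :
    (PySem.List.enumerate xs s).map (fun p => g (p.1 + 1, p.2))
      = (PySem.List.enumerate xs (s + 1)).map g := by
  induction xs generalizing s with
  | nil => simp [PySem.List.enumerate_nil]
  | cons x xs ih =>
      simp [PySem.List.enumerate_cons, ih]

-- ===== VERDICT (by name: the statement is the Claim_ definition above) =====
theorem optimal_block_spec : Claim_equal_optimal_block := by
  intro blocks requirements _hdom hpre
  obtain ⟨hne, -⟩ := hpre
  unfold Spec_optimal_block optimal_block optimal_block_alt
  rw [PySem.List.slice?_none_none_neg_one]
  simp only [Option.getD_some]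
  rw [PySem.List.foldl_append_singleton_eq_map]
  have hsc : (PySem.List.enumerate blocks 0).map
        (fun p => ((p.1 + 1 : Int), pyScoreA p.2 requirements.reverse))
      = (PySem.List.enumerate blocks 1).map
        (fun p => (p.1, hornerScore requirements p.2)) := by
    have := enumerate_shift (α := List (String × Bool))
      (g := fun p => ((p.1 : Int), hornerScore requirements p.2)) blocks 0
    simpa [score_eq] using this
  rw [hsc, pyGet?_zero, head?_sorted_rev_eq_max?]
  simp only [List.nil_append]
  rw [max?_map]
  obtain ⟨b, bs, rfl⟩ : ∃ b bs, blocks = b :: bs := by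
    cases blocks with
    | nil => exact absurd rfl hne
    | cons b bs => exact ⟨b, bs, rfl⟩
  rcases hmax : PySem.List.max? (PySem.List.enumerate (b :: bs) 1)
      (fun x => hornerScore requirements x.2) with _ | m
  · exact absurd hmax (by simp [PySem.List.max?_eq_none_iff, PySem.List.enumerate_cons])
  · simp
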